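-- pv_equiv track=rewrite | github.com/warrenregister/GEMSEC_DNA_Seq | EntropyPlotter.py | name_wash_combs
-- ===== SOURCE A (Python) =====
-- def name_wash_combs( wash_combs:list):
--     '''
--     Returns a list of representative names for a list of the different
--     filtered combinations of washes for a set's washes.
--
--     wash_combs: list of filtered combinations of a set's washes
--     '''
--     curname = 'w'
--     names = []
--     for washnum, wash in enumerate(wash_combs):
--         if washnum < len(wash_combs) - 1:
--             curname += str(washnum)
--         else:
--             curname += 'e'
--         names.append(curname)
--
--     return names
-- ===== SOURCE B (Python) =====
-- def name_wash_combs(wash_combs: list):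
--     '''
--     Returns a list of representative names for a list of the different
--     filtered combinations of washes for a set's washes.
--     '''
--     n = len(wash_combs)
--     if n == 0:
--         return []
--     body = [str(j) for j in range(n - 1)]
--     names = ['w' + ''.join(body[:k + 1]) for k in range(n - 1)]
--     names.append('w' + ''.join(body) + 'e')
--     return names
-- ===== Notes on version B (the rewrite author's own statement) =====
-- stated objective: alternative
-- what changed: Replaces the stateful loop that mutates a growing prefix string with direct per-index construction: each name is built independently as 'w' plus a slice of the precomputed digit-string list, with the final 'e'-suffixed name produced separately.
import Mathlib
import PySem

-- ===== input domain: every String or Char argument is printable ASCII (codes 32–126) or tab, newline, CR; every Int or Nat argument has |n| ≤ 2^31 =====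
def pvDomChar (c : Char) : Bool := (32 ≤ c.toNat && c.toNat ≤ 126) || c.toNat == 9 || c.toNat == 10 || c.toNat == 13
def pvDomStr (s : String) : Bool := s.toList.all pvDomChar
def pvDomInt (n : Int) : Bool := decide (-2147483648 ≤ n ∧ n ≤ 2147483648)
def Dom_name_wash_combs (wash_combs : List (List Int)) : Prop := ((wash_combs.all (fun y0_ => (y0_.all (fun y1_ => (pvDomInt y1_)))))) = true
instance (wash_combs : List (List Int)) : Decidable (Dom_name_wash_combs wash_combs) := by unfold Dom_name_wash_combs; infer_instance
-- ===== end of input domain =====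

-- B replaces A's stateful loop (mutating a growing prefix string) with direct
-- per-index construction of each name from a precomputed list of digit strings (alternative decomposition).

-- ===== PORT A =====
-- A's for-loop as structural recursion over the same state (washnum, curname, names)
def nameLoopA (n : Int) : Nat → String → List String → List (List Int) → List String
  | _, _, names, [] => names
  | washnum, curname, names, _ :: rest =>
      let curname' := if (washnum : Int) < n - 1 then curname ++ PySem.Int.toStr washnum
                      else curname ++ "e"
      nameLoopA n (washnum + 1) curname' (names ++ [curname']) rest

def name_wash_combs (wash_combs : List (List Int)) : List String :=
  nameLoopA (wash_combs.length : Int) 0 "w" [] wash_combs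

-- ===== PORT B =====
def name_wash_combs_alt (wash_combs : List (List Int)) : List String :=
  let n := wash_combs.length
  if n = 0 then []
  else
    let body := (List.range (n - 1)).map (fun j => PySem.Int.toStr (Int.ofNat j))
    ((List.range (n - 1)).map (fun k => "w" ++ PySem.Str.join "" (body.take (k + 1))))
      ++ ["w" ++ PySem.Str.join "" body ++ "e"]

-- ===== PRECONDITION & SPEC =====
def Spec_name_wash_combs (wash_combs : List (List Int)) (out : List String) : Prop := out = name_wash_combs_alt wash_combs
instance (wash_combs : List (List Int)) (out : List String) : Decidable (Spec_name_wash_combs wash_combs out) := by unfold Spec_name_wash_combs; infer_instance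

-- ===== CLAIM (what is proved, stated in full; the proofs are below) =====
def Claim_equal_name_wash_combs : Prop := ∀ (wash_combs : List (List Int)), Dom_name_wash_combs wash_combs → Spec_name_wash_combs wash_combs (name_wash_combs wash_combs)

-- ===== LEMMAS AND PROOFS =====

-- ''.join of a snoc: concatenation at the char-list level
theorem flatten_inter_nil (xs : List (List Char)) :
    (List.intersperse ([] : List Char) xs).flatten = xs.flatten := by
  induction xs with
  | nil => rfl
  | cons a t ih => cases t with
    | nil => rfl
    | cons b t2 =>
        show (a :: ([] : List Char) :: List.intersperse [] (b :: t2)).flatten = _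
        simp only [List.flatten_cons] at ih ⊢
        rw [ih]
        simp

theorem join_snoc (l : List String) (s : String) :
    PySem.Str.join "" (l ++ [s]) = PySem.Str.join "" l ++ s := by
  apply String.toList_injective
  simp [PySem.Str.join, PySem.Chars.join, List.intercalate, String.toList_ofList,
        flatten_inter_nil]

-- the cumulative prefix after k digit-appending steps of A's loop
def prefName (k : Nat) : String :=
  "w" ++ PySem.Str.join "" ((List.range k).map (fun j => PySem.Int.toStr (Int.ofNat j)))

theorem prefName_succ (k : Nat) :
    prefName (k + 1) = prefName k ++ PySem.Int.toStr (k : Int) := by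
  unfold prefName
  simp only [List.range_succ, List.map_append, List.map_singleton, join_snoc,
             String.append_assoc]
  norm_cast

-- the names A's loop still produces from index i with current prefix c (fuel = items left)
def tailN (n : Int) : Nat → Nat → String → List String
  | 0, _, _ => []
  | m + 1, i, c =>
      if (i : Int) < n - 1 then
        (c ++ PySem.Int.toStr (i : Int)) :: tailN n m (i + 1) (c ++ PySem.Int.toStr (i : Int))
      else [c ++ "e"]

theorem nameLoopA_eq_tailN (n : Nat) (ws : List (List Int)) :
    ∀ (i : Nat) (c : String) (acc : List String), i + ws.length = n →
      nameLoopA (n : Int) i c acc ws = acc ++ tailN (n : Int) ws.length i c := by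
  induction ws with
  | nil => intro i c acc _; simp [nameLoopA, tailN]
  | cons x rest ih =>
      intro i c acc hlen
      simp only [List.length_cons] at hlen
      simp only [nameLoopA, List.length_cons, tailN]
      by_cases h : (i : Int) < (n : Int) - 1
      · rw [if_pos h, if_pos h, ih (i+1) _ _ (by omega), List.append_assoc, List.singleton_append]
      · rw [if_neg h, if_neg h]
        have hr : rest.length = 0 := by
          have hi : (n : Int) - 1 ≤ (i : Int) := not_lt.mp h
          omega
        rw [List.length_eq_zero_iff] at hr
        subst hr
        simp [nameLoopA]

theorem tailN_eq (n : Nat) :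
    ∀ (m i : Nat), 1 ≤ m → i + m = n →
      tailN (n : Int) m i (prefName i) =
        (List.range' i (m - 1)).map (fun k => prefName (k + 1)) ++ [prefName (n - 1) ++ "e"] := by
  intro m
  induction m with
  | zero => omega
  | succ m ihm =>
      intro i _ hin
      simp only [tailN, Nat.add_sub_cancel]
      by_cases h : (i : Int) < (n : Int) - 1
      · have hm1 : 1 ≤ m := by
          have : (i : Int) + 1 < n := by omega
          omega
        rw [if_pos h, ← prefName_succ, ihm (i+1) hm1 (by omega)]
        have hr : List.range' i m = i :: List.range' (i+1) (m-1) := by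
          rw [show m = (m-1)+1 by omega, List.range'_succ]
          simp
        rw [hr, List.map_cons, List.cons_append]
      · rw [if_neg h]
        have hi : i = n - 1 := by
          have := not_lt.mp h
          omega
        have hm0 : m = 0 := by omega
        subst hm0
        simp [hi]

theorem main_eq (ws : List (List Int)) : name_wash_combs ws = name_wash_combs_alt ws := by
  unfold name_wash_combs name_wash_combs_alt
  by_cases h0 : ws.length = 0
  · rw [List.length_eq_zero_iff] at h0
    subst h0
    simp [nameLoopA]
  · simp only [if_neg h0]
    rw [nameLoopA_eq_tailN ws.length ws 0 "w" [] (by omega), List.nil_append,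
        show ("w" : String) = prefName 0 by decide,
        tailN_eq ws.length ws.length 0 (by omega) (by omega)]
    congr 1
    · rw [← List.range_eq_range']
      apply List.map_congr_left
      intro k hk
      have hk' : k < ws.length - 1 := List.mem_range.mp hk
      unfold prefName
      congr 1
      rw [← List.map_take, List.take_range, Nat.min_eq_left (by omega)]

-- ===== VERDICT (by name: the statement is the Claim_ definition above) =====
theorem name_wash_combs_spec : Claim_equal_name_wash_combs := by
  intro ws _
  unfold Spec_name_wash_combs
  exact main_eq ws
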